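-- pv_equiv track=rewrite | github.com/igor-baiborodine/coding-challenges | codility/lesson1/BinaryGap.py | solution
-- ===== SOURCE A (Python) =====
-- def solution(N):
--     max_bin_gap = 0
--     cur_bin_gap = 0
--     prev_rmnd = -1
--
--     while (N != 0):
--         cur_rmnd = N % 2
--
--         if cur_rmnd == 0:
--             if prev_rmnd == 1:
--                 cur_bin_gap = 1
--             elif prev_rmnd == 0 and cur_bin_gap > 0:
--                 cur_bin_gap += 1
--         else:
--             if prev_rmnd == 0 and cur_bin_gap > max_bin_gap:
--                 max_bin_gap = cur_bin_gap
--                 cur_bin_gap = 0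
--
--         prev_rmnd = cur_rmnd
--         N //= 2
--     return max_bin_gap
-- ===== SOURCE B (Python) =====
-- def solution(N):
--     groups = bin(N)[2:].split('1')
--     return max((len(g) for g in groups[1:-1]), default=0)
-- ===== Notes on version B (the rewrite author's own statement) =====
-- stated objective: idiomatic
-- what changed: Replaced the stateful bit-by-bit %2//2 while-loop (remainder/previous-remainder state machine) by building the binary string once and splitting it on '1': the gaps are exactly the interior groups, so the answer is the max of their lengths with default 0.
import Mathlib
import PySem

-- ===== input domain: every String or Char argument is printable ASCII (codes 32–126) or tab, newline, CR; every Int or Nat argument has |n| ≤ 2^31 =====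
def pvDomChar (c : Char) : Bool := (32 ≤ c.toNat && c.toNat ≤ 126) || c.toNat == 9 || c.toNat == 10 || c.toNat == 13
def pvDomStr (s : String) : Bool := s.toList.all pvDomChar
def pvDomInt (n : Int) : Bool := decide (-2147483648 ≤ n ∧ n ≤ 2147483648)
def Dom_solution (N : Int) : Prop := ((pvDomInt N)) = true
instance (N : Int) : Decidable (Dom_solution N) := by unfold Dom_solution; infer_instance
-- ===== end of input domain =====

-- B re-implements the binary-gap computation via bin(N)[2:].split('1') over the interior groups
-- instead of A's bit-by-bit %2,//2 state machine (objective: idiomatic; same return value on N ≥ 0).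

-- ===== PORT A =====
-- termination helper for A's while-loop (cited in decreasing_by)
theorem pvHalfLt {n : Int} (h : 0 < n) : (PySem.Int.floordiv n 2).toNat < n.toNat := by
  rw [PySem.Int.floordiv_eq_ediv_of_pos (by norm_num)]
  omega

-- while (N != 0): the 'if 0 < n' guard only makes the recursion total; for n ≥ 0 (Pre_) it is
-- exactly Python's 'N != 0' test (for n < 0 Python's loop never terminates).
def loopA (n m c p : Int) : Int :=
  if h : 0 < n then
    let r := PySem.Int.mod n 2
    if r = 0 then
      if p = 1 then loopA (PySem.Int.floordiv n 2) m 1 r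
      else if p = 0 ∧ 0 < c then loopA (PySem.Int.floordiv n 2) m (c + 1) r
      else loopA (PySem.Int.floordiv n 2) m c r
    else
      if p = 0 ∧ m < c then loopA (PySem.Int.floordiv n 2) c 0 r
      else loopA (PySem.Int.floordiv n 2) m c r
  else m
termination_by n.toNat
decreasing_by all_goals exact pvHalfLt h

def solution (N : Int) : Int := loopA N 0 0 (-1)

-- ===== PORT B =====
-- bin(n)[2:] for n ≥ 0 (digits only, most significant first); bin(0)[2:] = "0" is handled in solution_alt
def natBin (n : Nat) : List Char :=
  if n = 0 then [] else natBin (n / 2) ++ [if n % 2 = 1 then '1' else '0']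

-- s.split('1') for a single-character separator (Python str.split with explicit sep)
def split1 : List Char → List (List Char)
  | [] => [[]]
  | c :: t =>
      if c = '1' then [] :: split1 t
      else (c :: (split1 t).headI) :: (split1 t).tail

def solution_alt (N : Int) : Int :=
  let s : List Char := if N = 0 then ['0'] else natBin N.toNat  -- bin(N)[2:]
  let groups := split1 s                                        -- .split('1')
  let interior := (groups.drop 1).dropLast                      -- groups[1:-1]
  ((interior.map List.length).foldl Nat.max 0 : Nat)            -- max(lengths, default=0)

-- ===== PRECONDITION & SPEC =====
-- Pre_ excludes N < 0: there A's while-loop never terminates (N %= 2 / N //= 2 keeps N = -1), so A returns on exactly the inputs Pre_ admits.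
def Pre_solution (N : Int) : Prop := 0 ≤ N
instance (N : Int) : Decidable (Pre_solution N) := by unfold Pre_solution; infer_instance
def pvWitness_solution : Int := 1041

def Spec_solution (N : Int) (out : Int) : Prop := out = solution_alt N
instance (N : Int) (out : Int) : Decidable (Spec_solution N out) := by unfold Spec_solution; infer_instance

-- ===== CLAIM (what is proved, stated in full; the proofs are below) =====
def Claim_equal_solution : Prop := ∀ (N : Int), Dom_solution N → Pre_solution N → Spec_solution N (solution N)


-- ===== LEMMAS AND PROOFS =====

-- the char-list form of A's loop, processing the binary digits least-significant-first
def loopC : List Char → Int → Int → Int → Int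
  | [], m, _, _ => m
  | ch :: t, m, c, p =>
    if ch = '0' then
      if p = 1 then loopC t m 1 0
      else if p = 0 ∧ 0 < c then loopC t m (c + 1) 0
      else loopC t m c 0
    else
      if p = 0 ∧ m < c then loopC t c 0 1
      else loopC t m c 1

-- clean max-of-zero-runs scan (state: best so far, current run)
def runMax : List Char → Int → Int → Int
  | [], m, _ => m
  | ch :: t, m, c => if ch = '0' then runMax t m (c + 1) else runMax t (max m c) 0

def skipMax : List Char → Int
  | [] => 0
  | ch :: t => if ch = '0' then skipMax t else runMax t 0 0

-- add k to the first entry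
def bump (k : Nat) : List Nat → List Nat
  | [] => []
  | a :: r => (k + a) :: r

def IM (s : List Char) : Nat :=
  (((split1 s).drop 1).dropLast.map List.length).foldl Nat.max 0

def chars01 (l : List Char) : Prop := ∀ ch ∈ l, ch = '0' ∨ ch = '1'

theorem natBin_chars01 (n : Nat) : chars01 (natBin n) := by
  induction n using Nat.strong_induction_on with
  | _ n ih =>
    rw [natBin]
    split
    · intro ch h; simp at h
    · rename_i hne
      intro ch hch
      rw [List.mem_append] at hch
      rcases hch with h | h
      · exact ih (n / 2) (Nat.div_lt_self (Nat.pos_of_ne_zero hne) (by norm_num)) ch h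
      · simp only [List.mem_singleton] at h
        subst h
        split_ifs <;> simp

theorem split1_ne_nil (l : List Char) : split1 l ≠ [] := by
  cases l with
  | nil => simp [split1]
  | cons c t => rw [split1]; split_ifs <;> simp

theorem foldNatMax_comm (t : List Nat) : ∀ a x : Nat, t.foldl Nat.max (Nat.max a x) = Nat.max (t.foldl Nat.max a) x := by
  induction t with
  | nil => intro a x; rfl
  | cons b u ih =>
    intro a x
    simp only [List.foldl_cons]
    rw [show Nat.max (Nat.max a x) b = Nat.max (Nat.max a b) x by
      exact Nat.max_right_comm a x b, ih]

theorem foldNatMax_reverse (l : List Nat) : ∀ a : Nat, l.reverse.foldl Nat.max a = l.foldl Nat.max a := by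
  induction l with
  | nil => intro a; rfl
  | cons b u ih =>
    intro a
    simp only [List.reverse_cons, List.foldl_append, List.foldl_cons, List.foldl_nil, ih]
    rw [← foldNatMax_comm]
theorem loopA_eq_loopC (n : Nat) : ∀ m c p : Int, loopA (n : Int) m c p = loopC ((natBin n).reverse) m c p := by
  induction n using Nat.strong_induction_on with
  | _ n ih =>
    intro m c p
    by_cases hn0 : n = 0
    · subst hn0
      rw [loopA, natBin]
      simp [loopC]
    · have hpos : (0 : Int) < (n : Int) := by exact_mod_cast Nat.pos_of_ne_zero hn0
      have hlt := Nat.div_lt_self (Nat.pos_of_ne_zero hn0) (by norm_num : 1 < 2)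
      have hmod : PySem.Int.mod (n : Int) 2 = ((n % 2 : Nat) : Int) := by
        exact_mod_cast PySem.Int.mod_natCast n 2
      have hdiv : PySem.Int.floordiv (n : Int) 2 = ((n / 2 : Nat) : Int) := by
        exact_mod_cast PySem.Int.floordiv_natCast n 2
      rw [loopA]
      rw [natBin, if_neg hn0, List.reverse_append]
      simp only [dif_pos hpos, hmod, hdiv, List.reverse_singleton, List.singleton_append]
      rcases Nat.mod_two_eq_zero_or_one n with he | ho
      · rw [he, loopC]
        simp only [ih (n / 2) hlt]
        norm_num
      · rw [ho, loopC]
        simp only [ih (n / 2) hlt]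
        norm_num
        intro h
        exact absurd h (by decide)
theorem loopC_eq_runMax (l : List Char) (h : chars01 l) :
    ∀ m : Int, 0 ≤ m →
      (∀ c : Int, loopC l m c 1 = runMax l m 0) ∧
      (∀ c : Int, 0 < c → loopC l m c 0 = runMax l m c) := by
  induction l with
  | nil => exact fun m hm => ⟨fun c => rfl, fun c hc => rfl⟩
  | cons ch t ih =>
    have ht : chars01 t := fun x hx => h x (List.mem_cons_of_mem _ hx)
    have hch := h ch (List.mem_cons_self)
    intro m hm
    constructor
    · intro c
      rcases hch with h0 | h1
      · subst h0
        rw [loopC, runMax]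
        norm_num
        exact (ih ht m hm).2 1 one_pos
      · subst h1
        rw [loopC, runMax]
        norm_num
        rw [max_eq_left hm]
        exact (ih ht m hm).1 c
    · intro c hc
      rcases hch with h0 | h1
      · subst h0
        rw [loopC, runMax]
        norm_num [hc]
        exact (ih ht m hm).2 (c + 1) (by omega)
      · subst h1
        rw [loopC, runMax]
        norm_num
        by_cases hmc : m < c
        · rw [if_pos hmc, max_eq_right (le_of_lt hmc)]
          exact (ih ht c (le_of_lt hc)).1 0
        · rw [if_neg hmc, max_eq_left (by omega)]
          exact (ih ht m hm).1 c

theorem loopC_eq_skipMax (l : List Char) (h : chars01 l) :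
    loopC l 0 0 (-1) = skipMax l ∧ loopC l 0 0 0 = skipMax l := by
  induction l with
  | nil => exact ⟨rfl, rfl⟩
  | cons ch t ih =>
    have ht : chars01 t := fun x hx => h x (List.mem_cons_of_mem _ hx)
    rcases h ch List.mem_cons_self with h0 | h1
    · subst h0
      constructor
      · rw [loopC, skipMax]; norm_num; exact (ih ht).2
      · rw [loopC, skipMax]; norm_num; exact (ih ht).2
    · subst h1
      constructor
      · rw [loopC, skipMax]; norm_num; exact (loopC_eq_runMax t ht 0 le_rfl).1 0
      · rw [loopC, skipMax]; norm_num; exact (loopC_eq_runMax t ht 0 le_rfl).1 0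
theorem bump_zero (xs : List Nat) : bump 0 xs = xs := by
  cases xs <;> simp [bump]

theorem runMax_eq_fold (l : List Char) (h : chars01 l) :
    ∀ m c : Int, 0 ≤ m → 0 ≤ c →
      runMax l m c = ((bump c.toNat (((split1 l).dropLast).map List.length)).map (Int.ofNat ·)).foldl max m := by
  induction l with
  | nil =>
    intro m c hm hc
    simp [runMax, split1, bump]
  | cons ch t ih =>
    have ht : chars01 t := fun x hx => h x (List.mem_cons_of_mem _ hx)
    obtain ⟨g, gs, hS⟩ := List.exists_cons_of_ne_nil (split1_ne_nil t)
    intro m c hm hc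
    rcases h ch List.mem_cons_self with h0 | h1
    · subst h0
      rw [runMax, split1, if_neg (show ¬('0' = '1') by decide), hS]
      norm_num
      cases gs with
      | nil =>
        rw [ih ht m (c + 1) hm (by omega), hS]
        simp [bump]
      | cons g2 gs' =>
        rw [ih ht m (c + 1) hm (by omega), hS]
        simp only [List.map_cons, List.dropLast_cons₂, bump, List.foldl_cons]
        rw [show (c + 1).toNat + g.length = c.toNat + (g.length + 1) by omega]
        simp [List.map_dropLast]
    · subst h1
      rw [runMax, split1, if_pos rfl, if_neg (show ¬('1' = '0') by decide), hS]
      rw [ih ht (max m c) 0 (le_max_of_le_left hm) le_rfl, hS]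
      rw [show ((0 : Int)).toNat = 0 from rfl, bump_zero]
      simp only [List.map_cons, List.dropLast_cons₂, bump, List.foldl_cons]
      simp [Int.ofNat_eq_natCast, Int.toNat_of_nonneg hc]
theorem foldMax_cast (ns : List Nat) : ∀ a : Nat,
    (ns.map (Int.ofNat ·)).foldl max (Int.ofNat a) = Int.ofNat (ns.foldl Nat.max a) := by
  induction ns with
  | nil => intro a; rfl
  | cons b t ih =>
    intro a
    simp only [List.map_cons, List.foldl_cons]
    rw [show max (Int.ofNat a) (Int.ofNat b) = Int.ofNat (Nat.max a b) by
      simp [Int.ofNat_eq_natCast, Nat.cast_max]]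
    exact ih _

theorem skipMax_eq_IM (l : List Char) (h : chars01 l) : skipMax l = (IM l : Int) := by
  induction l with
  | nil => simp [skipMax, IM, split1]
  | cons ch t ih =>
    have ht : chars01 t := fun x hx => h x (List.mem_cons_of_mem _ hx)
    obtain ⟨g, gs, hS⟩ := List.exists_cons_of_ne_nil (split1_ne_nil t)
    rcases h ch List.mem_cons_self with h0 | h1
    · subst h0
      rw [skipMax, if_pos rfl, ih ht]
      unfold IM
      rw [split1, if_neg (show ¬('0' = '1') by decide), hS]
      simp
    · subst h1
      rw [skipMax, if_neg (show ¬('1' = '0') by decide)]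
      rw [runMax_eq_fold t ht 0 0 le_rfl le_rfl]
      rw [show ((0 : Int)).toNat = 0 from rfl, bump_zero]
      unfold IM
      rw [split1, if_pos rfl, List.drop_one]
      rw [show ((([] : List Char) :: split1 t).tail) = split1 t from rfl]
      rw [show (0 : Int) = Int.ofNat 0 from rfl, foldMax_cast]
      simp

theorem split1_concat (x : List Char) (c : Char) :
    split1 (x ++ [c]) =
      if c = '1' then split1 x ++ [[]]
      else (split1 x).dropLast ++ [(split1 x).getLastD [] ++ [c]] := by
  induction x with
  | nil =>
    by_cases hc : c = '1'
    · subst hc; simp [split1]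
    · simp [split1, hc]
  | cons a x' ih =>
    obtain ⟨h0, tS, hS⟩ := List.exists_cons_of_ne_nil (split1_ne_nil x')
    by_cases ha : a = '1'
    · subst ha
      by_cases hc : c = '1'
      · subst hc
        simp [split1, ih, hS]
      · simp only [List.cons_append, split1, ih, if_neg hc]
        rw [hS]
        cases tS with
        | nil => simp
        | cons b u => simp
    · by_cases hc : c = '1'
      · subst hc
        simp only [List.cons_append, split1, if_neg ha, ih]
        rw [hS]
        simp
      · simp only [List.cons_append, split1, if_neg ha, ih, if_neg hc]
        rw [hS]
        cases tS with
        | nil => simp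
        | cons b u => simp

theorem split1_reverse (l : List Char) :
    split1 l.reverse = ((split1 l).map List.reverse).reverse := by
  induction l with
  | nil => simp [split1]
  | cons c t ih =>
    rw [List.reverse_cons, split1_concat, ih]
    obtain ⟨g, gs, hS⟩ := List.exists_cons_of_ne_nil (split1_ne_nil t)
    by_cases hc : c = '1'
    · subst hc
      rw [if_pos rfl, split1, if_pos rfl]
      simp
    · rw [if_neg hc, split1, if_neg hc, hS]
      simp
theorem revTail (ns : List Nat) : ns.reverse.tail = ns.dropLast.reverse := by
  cases ns using List.reverseRecOn <;> simp

theorem revDropLast (ns : List Nat) : ns.reverse.dropLast = ns.tail.reverse := by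
  conv_lhs => rw [show ns = ns.reverse.reverse by simp]
  rw [show ns.reverse.reverse.reverse.dropLast = ns.reverse.dropLast by simp]
  rw [show ns.reverse.dropLast = (ns.reverse.dropLast.reverse).reverse by simp, ← revTail]
  simp

theorem tailDropLast (ns : List Nat) : ns.dropLast.tail = ns.tail.dropLast := by
  match ns with
  | [] => rfl
  | [a] => rfl
  | a :: b :: r => rfl

theorem IM_reverse (l : List Char) : IM l.reverse = IM l := by
  unfold IM
  rw [split1_reverse]
  have hmap : ∀ (X : List (List Char)),
      ((X.drop 1).dropLast).map List.length = ((X.map List.length).drop 1).dropLast := by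
    intro X
    rw [List.map_dropLast, List.map_drop]
  rw [hmap, hmap]
  have hlen : (((split1 l).map List.reverse).reverse).map List.length
      = ((split1 l).map List.length).reverse := by
    simp [Function.comp]
  rw [hlen]
  generalize (split1 l).map List.length = ns
  rw [List.drop_one, List.drop_one, revTail, revDropLast, tailDropLast]
  exact foldNatMax_reverse _ 0

-- ===== VERDICT (by name: the statement is the Claim_ definition above) =====
theorem solution_spec : Claim_equal_solution := by
  intro N _ hN
  unfold Spec_solution
  rcases eq_or_lt_of_le hN with h0 | hpos
  · subst h0
    rw [show solution 0 = 0 by rw [solution, loopA]; simp]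
    rw [show solution_alt 0 = 0 by simp [solution_alt, split1]]
  · have hn : N = (N.toNat : Int) := by omega
    have hne : N.toNat ≠ 0 := by omega
    have h01 : chars01 ((natBin N.toNat).reverse) := by
      intro ch hch
      exact natBin_chars01 N.toNat ch (List.mem_reverse.mp hch)
    have hB : solution_alt N = (IM (natBin N.toNat) : Int) := by
      simp [solution_alt, IM, if_neg (by omega : ¬ N = 0)]
    rw [hB, ← IM_reverse, ← skipMax_eq_IM _ h01,
        ← (loopC_eq_skipMax _ h01).1]
    show solution N = _
    rw [solution, hn, loopA_eq_loopC, Int.toNat_natCast]
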